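-- pv_equiv track=rewrite | github.com/Javitronxo/AdventOfCode | 2015/day_1.py | get_floor
-- ===== SOURCE A (Python) =====
-- from typing import Tuple, Union
--
-- def get_floor(input_str: str, first_time_level: int = None) -> Tuple[int, Union[None, int]]:
--     level = 0
--     position_first_time_level = None
--     for i in range(len(input_str)):
--         if input_str[i] == '(':
--             level += 1
--         elif input_str[i] == ')':
--             level -= 1
--         if first_time_level and level == first_time_level:
--             position_first_time_level = i + 1
--             first_time_level = None
--     return level, position_first_time_level
-- ===== SOURCE B (Python) =====
-- def get_floor(input_str, first_time_level=None):
--     # Build the full running prefix-sum table of floor levels, then query it.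
--     prefix = []
--     total = 0
--     for c in input_str:
--         total += (c == '(') - (c == ')')
--         prefix.append(total)
--     level = prefix[-1] if prefix else 0
--     position = None
--     if first_time_level:
--         position = next((i + 1 for i, v in enumerate(prefix) if v == first_time_level), None)
--     return level, position
-- ===== Notes on version B (the rewrite author's own statement) =====
-- stated objective: alternative
-- what changed: A interleaves level updates and first-reach detection in one indexed loop with a mutable sentinel; B materializes the full prefix-sum table of levels, takes the floor as its last entry and finds the first-reach position by a separate first-match query over the table.
import Mathlib
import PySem

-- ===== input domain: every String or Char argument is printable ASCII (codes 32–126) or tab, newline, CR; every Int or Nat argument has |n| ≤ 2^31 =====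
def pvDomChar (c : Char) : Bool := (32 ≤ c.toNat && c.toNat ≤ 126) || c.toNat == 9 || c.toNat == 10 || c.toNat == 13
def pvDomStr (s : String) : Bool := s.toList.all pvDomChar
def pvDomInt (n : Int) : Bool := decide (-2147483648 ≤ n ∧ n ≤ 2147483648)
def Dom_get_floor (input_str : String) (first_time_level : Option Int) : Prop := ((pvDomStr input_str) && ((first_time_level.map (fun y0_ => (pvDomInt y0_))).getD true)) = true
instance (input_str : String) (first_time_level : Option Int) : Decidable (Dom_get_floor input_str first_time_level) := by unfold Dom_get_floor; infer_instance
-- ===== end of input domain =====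

-- B replaces A's single combined updating loop by a materialized prefix-sum table of
-- levels queried afterwards (floor = last entry, position = first match); alternative, same cost.

-- Python truthiness of an Optional[int] (None and 0 are falsy)
def pvTruthy : Option Int → Bool
  | some t => t != 0
  | none => false

-- ===== PORT A =====
-- one iteration of A's loop body, on (level, position_first_time_level, first_time_level) and (i, input_str[i])
def pvStepA (st : Int × Option Int × Option Int) (ic : Int × Char) : Int × Option Int × Option Int :=
  let level := if ic.2 = '(' then st.1 + 1 else if ic.2 = ')' then st.1 - 1 else st.1
  if pvTruthy st.2.2 && (some level == st.2.2) then (level, some (ic.1 + 1), none)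
  else (level, st.2.1, st.2.2)

def get_floor (input_str : String) (first_time_level : Option Int) : Int × Option Int :=
  let cs := input_str.toList
  let r := (PySem.List.pyRange 0 (cs.length : Int) 1).foldl
      (fun st i => pvStepA st (i, PySem.List.pyGetD cs i ' ')) (0, none, first_time_level)
  (r.1, r.2.1)

-- ===== PORT B =====
def pvDelta (c : Char) : Int := (if c = '(' then 1 else 0) - (if c = ')' then 1 else 0)

def get_floor_alt (input_str : String) (first_time_level : Option Int) : Int × Option Int :=
  let pr := (input_str.toList.foldl
      (fun (acc : List Int × Int) c =>
        let total := acc.2 + pvDelta c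
        (acc.1 ++ [total], total)) ([], 0)).1
  let level := pr.getLast?.getD 0
  let position : Option Int :=
    if pvTruthy first_time_level then
      (pr.findIdx? (fun v => some v == first_time_level)).map (fun i => (i : Int) + 1)
    else none
  (level, position)

-- ===== PRECONDITION & SPEC =====
def Spec_get_floor (input_str : String) (first_time_level : Option Int) (out : Int × Option Int) : Prop := out = get_floor_alt input_str first_time_level
instance (input_str : String) (first_time_level : Option Int) (out : Int × Option Int) : Decidable (Spec_get_floor input_str first_time_level out) := by unfold Spec_get_floor; infer_instance

-- ===== CLAIM (what is proved, stated in full; the proofs are below) =====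
def Claim_equal_get_floor : Prop := ∀ (input_str : String) (first_time_level : Option Int), Dom_get_floor input_str first_time_level → Spec_get_floor input_str first_time_level (get_floor input_str first_time_level)

-- ===== LEMMAS AND PROOFS =====

-- running prefix sums of levels starting from lv
def pvPrefixes : List Char → Int → List Int
  | [], _ => []
  | c :: cs, lv => (lv + pvDelta c) :: pvPrefixes cs (lv + pvDelta c)

theorem pvLastD_cons (x : Int) (xs : List Int) (d : Int) :
    (x :: xs).getLast?.getD d = xs.getLast?.getD x := by
  cases xs with
  | nil => rfl
  | cons y ys =>
    rw [List.getLast?_cons_cons]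
    cases h : (y :: ys).getLast? with
    | none => simp at h
    | some z => simp

-- one step of A, written with the delta of the character
theorem pvStepA_eq (st : Int × Option Int × Option Int) (ic : Int × Char) :
    pvStepA st ic =
      if pvTruthy st.2.2 && (some (st.1 + pvDelta ic.2) == st.2.2)
      then (st.1 + pvDelta ic.2, some (ic.1 + 1), none)
      else (st.1 + pvDelta ic.2, st.2.1, st.2.2) := by
  unfold pvStepA pvDelta
  by_cases h1 : ic.2 = '(' <;> by_cases h2 : ic.2 = ')' <;> simp_all [Int.sub_eq_add_neg]

theorem pvBuild (cs : List Char) (acc : List Int) (lv : Int) :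
    (cs.foldl (fun (acc : List Int × Int) c =>
        let total := acc.2 + pvDelta c
        (acc.1 ++ [total], total)) (acc, lv)).1 = acc ++ pvPrefixes cs lv := by
  induction cs generalizing acc lv with
  | nil => simp [pvPrefixes]
  | cons c cs ih => simp [pvPrefixes, ih, List.append_assoc]

-- A's loop when first_time_level is falsy: only the level changes
theorem pvFold_falsy (cs : List Char) (s lv : Int) (pos ftl : Option Int)
    (h : pvTruthy ftl = false) :
    (PySem.List.enumerate cs s).foldl pvStepA (lv, pos, ftl)
      = ((pvPrefixes cs lv).getLast?.getD lv, pos, ftl) := by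
  induction cs generalizing s lv with
  | nil => simp [PySem.List.enumerate_nil, pvPrefixes]
  | cons c cs ih =>
    rw [PySem.List.enumerate_cons, List.foldl_cons, pvStepA_eq]
    simp only [h, Bool.false_and, Bool.false_eq_true, if_false]
    rw [ih (s + 1) (lv + pvDelta c), pvPrefixes, pvLastD_cons]

-- A's loop when first_time_level = some t, t ≠ 0
theorem pvFold_truthy (cs : List Char) (s lv t : Int) (h : t ≠ 0) :
    ∃ f, (PySem.List.enumerate cs s).foldl pvStepA (lv, none, some t)
      = ((pvPrefixes cs lv).getLast?.getD lv,
         ((pvPrefixes cs lv).findIdx? (fun v => some v == some t)).map (fun i => s + (i : Int) + 1),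
         f) := by
  induction cs generalizing s lv with
  | nil => exact ⟨some t, by simp [PySem.List.enumerate_nil, pvPrefixes]⟩
  | cons c cs ih =>
    rw [PySem.List.enumerate_cons, List.foldl_cons, pvStepA_eq]
    by_cases hc : lv + pvDelta c = t
    · rw [if_pos (by simp [pvTruthy, h, hc])]
      rw [pvFold_falsy cs (s + 1) (lv + pvDelta c) (some (s + 1)) none rfl]
      refine ⟨none, ?_⟩
      rw [pvPrefixes, pvLastD_cons]
      have hfi : List.findIdx? (fun v => some v == some t)
          ((lv + pvDelta c) :: pvPrefixes cs (lv + pvDelta c)) = some 0 := by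
        simp [List.findIdx?_cons, hc]
      rw [hfi]
      simp
    · rw [if_neg (by simp [pvTruthy, hc])]
      obtain ⟨f, hf⟩ := ih (s + 1) (lv + pvDelta c)
      refine ⟨f, ?_⟩
      rw [hf, pvPrefixes, pvLastD_cons]
      have hfi : List.findIdx? (fun v => some v == some t) ((lv + pvDelta c) :: pvPrefixes cs (lv + pvDelta c))
          = (List.findIdx? (fun v => some v == some t) (pvPrefixes cs (lv + pvDelta c))).map (· + 1) := by
        simp [List.findIdx?_cons, hc]
      rw [hfi]
      congr 1
      cases List.findIdx? (fun v => some v == some t) (pvPrefixes cs (lv + pvDelta c)) with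
      | none => simp
      | some k => simp; ring

-- A's indexed range-loop is the loop over enumerate
theorem pvRange_to_enumerate (cs : List Char) (init : Int × Option Int × Option Int) :
    (PySem.List.pyRange 0 (cs.length : Int) 1).foldl
        (fun st i => pvStepA st (i, PySem.List.pyGetD cs i ' ')) init
      = (PySem.List.enumerate cs 0).foldl pvStepA init := by
  rw [PySem.List.enumerate_eq_map_pyRange cs ' ', List.foldl_map]
  simp [PySem.List.len]

-- ===== VERDICT (by name: the statement is the Claim_ definition above) =====
theorem get_floor_spec : Claim_equal_get_floor := by
  intro input_str ftl _
  unfold Spec_get_floor get_floor get_floor_alt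
  dsimp only
  rw [pvRange_to_enumerate, pvBuild]
  simp only [List.nil_append]
  cases hftl : pvTruthy ftl with
  | false =>
    rw [pvFold_falsy input_str.toList 0 0 none ftl hftl]
    simp
  | true =>
    cases ftl with
    | none => simp [pvTruthy] at hftl
    | some t =>
      have ht : t ≠ 0 := by simpa [pvTruthy] using hftl
      obtain ⟨f, hf⟩ := pvFold_truthy input_str.toList 0 0 t ht
      rw [hf]
      simp only [if_true]
      congr 1
      cases List.findIdx? (fun v => some v == some t) (pvPrefixes input_str.toList 0) with
      | none => simp
      | some k => simp
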